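-- pv_equiv track=rewrite | github.com/pabloschwarzenberg/grader | tema4_ej3/tema4_ej3_28a5451681abb27df4194ecf74b69564.py | jerigonzo
-- ===== SOURCE A (Python) =====
-- def jerigonzo(string):
--     vocal="aeiouAEIOU"
--     codificado = ""
--     for A in string:
--         if A in vocal:
--             codificado += A
--             codificado +="p"
--         codificado += A
--
--
--     return codificado
-- ===== SOURCE B (Python) =====
-- import re
--
-- def jerigonzo(string):
--     return re.sub(r"([aeiouAEIOU])", r"\1p\1", string)
-- ===== Notes on version B (the rewrite author's own statement) =====
-- stated objective: idiomatic
-- what changed: Replaces the explicit per-character loop with string accumulator by a single regex substitution that expands each vowel into vowel, marker, vowel in one pattern-driven pass.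
import Mathlib
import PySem

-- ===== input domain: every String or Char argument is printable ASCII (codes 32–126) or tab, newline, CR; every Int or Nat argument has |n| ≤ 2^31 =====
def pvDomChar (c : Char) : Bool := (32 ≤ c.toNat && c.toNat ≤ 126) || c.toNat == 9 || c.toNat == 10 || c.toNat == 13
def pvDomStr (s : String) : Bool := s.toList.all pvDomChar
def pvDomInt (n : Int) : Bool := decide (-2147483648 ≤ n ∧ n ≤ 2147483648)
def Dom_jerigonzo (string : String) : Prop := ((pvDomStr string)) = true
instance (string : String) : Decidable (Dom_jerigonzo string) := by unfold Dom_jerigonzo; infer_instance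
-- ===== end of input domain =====

-- B replaces the explicit accumulator loop by a regex substitution (ported as a flatMap per-character expansion); idiomatic.


-- ===== PORT A =====
-- A: loop over the characters, appending v, 'p', v for vowels, c otherwise.
def jerigonzoVocal : List Char := "aeiouAEIOU".toList

def jerigonzoLoop (acc : List Char) : List Char → List Char
  | [] => acc
  | a :: rest =>
      jerigonzoLoop (if a ∈ jerigonzoVocal then acc ++ [a] ++ ['p'] ++ [a] else acc ++ [a]) rest

def jerigonzo (string : String) : String :=
  String.mk (jerigonzoLoop [] string.toList)

-- ===== PORT B =====
-- B: regex sub r"([aeiouAEIOU])" -> r"\1p\1"; on this anchored single-char pattern this is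
-- exactly an independent per-character expansion, ported as flatMap.
def jerigonzo_alt (string : String) : String :=
  String.mk (string.toList.flatMap fun c => if c ∈ jerigonzoVocal then [c, 'p', c] else [c])

-- ===== PRECONDITION & SPEC =====
def Spec_jerigonzo (string : String) (out : String) : Prop := out = jerigonzo_alt string
instance (string : String) (out : String) : Decidable (Spec_jerigonzo string out) := by unfold Spec_jerigonzo; infer_instance

-- ===== CLAIM (what is proved, stated in full; the proofs are below) =====
def Claim_equal_jerigonzo : Prop := ∀ (string : String), Dom_jerigonzo string → Spec_jerigonzo string (jerigonzo string)

-- ===== LEMMAS AND PROOFS =====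
theorem jerigonzoLoop_eq (l : List Char) : ∀ acc,
    jerigonzoLoop acc l = acc ++ l.flatMap (fun c => if c ∈ jerigonzoVocal then [c, 'p', c] else [c]) := by
  induction l with
  | nil => simp [jerigonzoLoop]
  | cons a rest ih =>
      intro acc
      simp only [jerigonzoLoop, List.flatMap_cons, ih]
      by_cases h : a ∈ jerigonzoVocal <;> simp [h]

-- ===== VERDICT (by name: the statement is the Claim_ definition above) =====
theorem jerigonzo_spec : Claim_equal_jerigonzo := by
  intro s _
  show _ = _
  simp [jerigonzo, jerigonzo_alt, jerigonzoLoop_eq]
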